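-- pv_equiv track=rewrite | github.com/Alihoe/sieve_projectwork | src/title_matching.py | rank_by_title
-- ===== SOURCE A (Python) =====
-- def rank_by_title(query_dict, data_dict):
--     predictions = {}
--     queries_without_titles = []
--
--     for query_id, query_text in query_dict.items():
--         query_text_lower = query_text.lower()
--         matches = [
--             data_id
--             for data_id, data in data_dict.items()
--             if "title" in data and data["title"] and data["title"].lower() in query_text_lower
--         ]
--         if matches:
--             predictions[query_id] = matches
--         else:
--             queries_without_titles.append(query_id)
--
--     return predictions, queries_without_titles
-- ===== SOURCE B (Python) =====
-- def rank_by_title(query_dict, data_dict):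
--     # Multi-pattern substring matching via a hash index of titles: slide a window of
--     # each distinct title length over the query and look the window up in a title set,
--     # instead of running one substring search per (query, title) pair.
--     pairs = []
--     title_set = set()
--     for data_id, data in data_dict.items():
--         title = data.get("title")
--         if title:
--             t = title.lower()
--             pairs.append((data_id, t))
--             title_set.add(t)
--     lengths = {len(t) for t in title_set}
--
--     predictions = {}
--     queries_without_titles = []
--     for query_id, query_text in query_dict.items():
--         q = query_text.lower()
--         n = len(q)
--         matched = set()
--         for m in lengths:
--             for i in range(n - m + 1):
--                 window = q[i:i + m]
--                 if window in title_set: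
--                     matched.add(window)
--         matches = [data_id for data_id, t in pairs if t in matched]
--         if matches:
--             predictions[query_id] = matches
--         else:
--             queries_without_titles.append(query_id)
--     return predictions, queries_without_titles
-- ===== Notes on version B (the rewrite author's own statement) =====
-- stated objective: faster
-- what changed: B replaces A's per-(query,title) substring searches with a multi-pattern hash index: titles are lowercased once into a set plus the set of their distinct lengths, and each query is scanned once per distinct title length with fixed-size windows looked up in the title set, then ids are collected by one membership pass over the precomputed (id, lowered title) pairs.
import Mathlib
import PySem

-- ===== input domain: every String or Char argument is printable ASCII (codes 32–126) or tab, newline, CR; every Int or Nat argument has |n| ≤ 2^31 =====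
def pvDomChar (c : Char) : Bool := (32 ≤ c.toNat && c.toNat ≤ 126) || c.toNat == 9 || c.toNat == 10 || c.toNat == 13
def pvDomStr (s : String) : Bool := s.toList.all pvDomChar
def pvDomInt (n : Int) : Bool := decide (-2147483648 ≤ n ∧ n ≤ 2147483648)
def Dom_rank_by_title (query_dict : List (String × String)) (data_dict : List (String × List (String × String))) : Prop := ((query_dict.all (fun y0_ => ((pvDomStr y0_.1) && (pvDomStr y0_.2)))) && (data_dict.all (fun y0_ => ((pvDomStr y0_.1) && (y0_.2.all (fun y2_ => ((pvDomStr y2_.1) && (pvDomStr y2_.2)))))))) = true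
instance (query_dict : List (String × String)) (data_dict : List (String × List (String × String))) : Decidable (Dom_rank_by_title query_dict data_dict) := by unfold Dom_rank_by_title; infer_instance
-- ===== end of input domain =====

-- B replaces A's per-(query,title) substring searches with a hash index of lowered titles:
-- per query, windows of each distinct title length are looked up in the title set; return values proved equal on all inputs.


-- ===== PORT A =====
-- literal port of A: for each query, a comprehension over data_dict collecting the ids whose
-- (present, non-empty) title, lowercased, is a substring of the lowercased query text
def rank_by_title (query_dict : List (String × String)) (data_dict : List (String × List (String × String))) : (List (String × List String)) × List String :=
  let r := query_dict.foldl
    (fun (st : PySem.Dict String (List String) × List String) q =>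
      let query_text_lower := PySem.Str.lower q.2
      let matches_ := data_dict.foldl
        (fun (acc : List String) d =>
          match (PySem.Dict.mk d.2).get? "title" with
          | some t => if (!(t == "")) && PySem.Str.isIn (PySem.Str.lower t) query_text_lower then acc ++ [d.1] else acc
          | none => acc) []
      if matches_ ≠ [] then (st.1.insert q.1 matches_, st.2) else (st.1, st.2 ++ [q.1]))
    (PySem.Dict.empty, ([] : List String))
  (r.1.items, r.2)

-- ===== PORT B =====
-- port of B: one indexing pass over data_dict building (id, lowered title) pairs, the set of
-- lowered titles and the set of their lengths; per query, slide a window of each distinct title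
-- length over the lowered query, look it up in the title set, then filter the pairs by membership
def rank_by_title_alt (query_dict : List (String × String)) (data_dict : List (String × List (String × String))) : (List (String × List String)) × List String :=
  let idx := data_dict.foldl
    (fun (acc : List (String × String) × PySem.Set String) d =>
      match (PySem.Dict.mk d.2).get? "title" with
      | some title =>
          if !(title == "") then
            let t := PySem.Str.lower title
            (acc.1 ++ [(d.1, t)], PySem.Set.add acc.2 t)
          else acc
      | none => acc)
    ([], PySem.Set.empty)
  let pairs := idx.1
  let title_set := idx.2
  let lengths : PySem.Set Int := PySem.Set.ofList (title_set.map (fun t => PySem.Str.len t))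
  let r := query_dict.foldl
    (fun (st : PySem.Dict String (List String) × List String) qp =>
      let q := PySem.Str.lower qp.2
      let n := PySem.Str.len q
      let matched := lengths.foldl
        (fun (ms : PySem.Set String) m =>
          (PySem.List.pyRange 0 (n - m + 1) 1).foldl
            (fun (ms : PySem.Set String) i =>
              if PySem.Set.contains title_set (PySem.Str.slice q (some i) (some (i + m))) then
                PySem.Set.add ms (PySem.Str.slice q (some i) (some (i + m)))
              else ms)
            ms)
        PySem.Set.empty
      let matches_ := (pairs.filter (fun p => PySem.Set.contains matched p.2)).map (fun p => p.1)
      if matches_ ≠ [] then (st.1.insert qp.1 matches_, st.2) else (st.1, st.2 ++ [qp.1]))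
    (PySem.Dict.empty, ([] : List String))
  (r.1.items, r.2)

-- ===== PRECONDITION & SPEC =====
def Spec_rank_by_title (query_dict : List (String × String)) (data_dict : List (String × List (String × String))) (out : (List (String × List String)) × List String) : Prop := out = rank_by_title_alt query_dict data_dict
instance (query_dict : List (String × String)) (data_dict : List (String × List (String × String))) (out : (List (String × List String)) × List String) : Decidable (Spec_rank_by_title query_dict data_dict out) := by unfold Spec_rank_by_title; infer_instance

-- ===== CLAIM (what is proved, stated in full; the proofs are below) =====
def Claim_equal_rank_by_title : Prop := ∀ (query_dict : List (String × String)) (data_dict : List (String × List (String × String))), Dom_rank_by_title query_dict data_dict → Spec_rank_by_title query_dict data_dict (rank_by_title query_dict data_dict)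

-- ===== LEMMAS AND PROOFS =====

-- the lowered title of a data entry, if present and non-empty (the entries both programs keep)
def pvTitle? (d : String × List (String × String)) : Option String :=
  match (PySem.Dict.mk d.2).get? "title" with
  | some t => if t == "" then none else some (PySem.Str.lower t)
  | none => none

def pvTls (dd : List (String × List (String × String))) : List String := dd.filterMap pvTitle?

def pvPairs (dd : List (String × List (String × String))) : List (String × String) :=
  dd.filterMap (fun d => (pvTitle? d).map (fun t => (d.1, t)))

-- A's per-entry match condition, through pvTitle?
def pvCond (d : String × List (String × String)) (ql : String) : Bool :=
  match pvTitle? d with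
  | some t => PySem.Str.isIn t ql
  | none => false

-- the ids A's comprehension collects for a lowered query text
def pvMatches (dd : List (String × List (String × String))) (ql : String) : List String :=
  (dd.filter (fun d => pvCond d ql)).map Prod.fst

-- A's inner fold (the comprehension) computes pvMatches
lemma fold_matches (dd : List (String × List (String × String))) (ql : String) :
    ∀ acc : List String,
    dd.foldl
      (fun (acc : List String) d =>
        match (PySem.Dict.mk d.2).get? "title" with
        | some t => if (!(t == "")) && PySem.Str.isIn (PySem.Str.lower t) ql then acc ++ [d.1] else acc
        | none => acc) acc
      = acc ++ pvMatches dd ql := by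
  induction dd with
  | nil => intro acc; simp [pvMatches]
  | cons d dd ih =>
      intro acc
      rw [List.foldl_cons]
      have hstep : (match (PySem.Dict.mk d.2).get? "title" with
          | some t => if (!(t == "")) && PySem.Str.isIn (PySem.Str.lower t) ql then acc ++ [d.1] else acc
          | none => acc) = acc ++ (if pvCond d ql then [d.1] else []) := by
        unfold pvCond pvTitle?
        rcases (PySem.Dict.mk d.2).get? "title" with _ | t
        · simp
        · by_cases ht : (t == "") = true
          · simp [ht]
          · simp only [ht, Bool.not_false, Bool.true_and, Bool.false_eq_true, if_false]
            split <;> simp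
      have hm : pvMatches (d :: dd) ql = (if pvCond d ql then [d.1] else []) ++ pvMatches dd ql := by
        by_cases h : pvCond d ql <;> simp [pvMatches, h]
      rw [hstep, hm, ih, List.append_assoc]

-- B's indexing fold computes (pvPairs, set of pvTls)
lemma idx_fold (dd : List (String × List (String × String))) :
    ∀ acc : List (String × String) × PySem.Set String,
    dd.foldl
      (fun (acc : List (String × String) × PySem.Set String) d =>
        match (PySem.Dict.mk d.2).get? "title" with
        | some title =>
            if !(title == "") then
              (acc.1 ++ [(d.1, PySem.Str.lower title)], PySem.Set.add acc.2 (PySem.Str.lower title))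
            else acc
        | none => acc) acc
      = (acc.1 ++ pvPairs dd, PySem.Set.update acc.2 (pvTls dd)) := by
  induction dd with
  | nil => intro acc; simp [pvPairs, pvTls, PySem.Set.update]
  | cons d dd ih =>
      intro acc
      rw [List.foldl_cons]
      rcases hg : (PySem.Dict.mk d.2).get? "title" with _ | t
      · have hti : pvTitle? d = none := by simp [pvTitle?, hg]
        rw [ih]
        simp [pvPairs, pvTls, hti]
      · by_cases ht : (t == "") = true
        · have hti : pvTitle? d = none := by simp [pvTitle?, hg, ht]
          simp only [ht, Bool.not_true, Bool.false_eq_true, if_false]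
          rw [ih]
          simp [pvPairs, pvTls, hti]
        · have hti : pvTitle? d = some (PySem.Str.lower t) := by simp [pvTitle?, hg, ht]
          simp only [ht, Bool.not_false, if_true]
          rw [ih]
          simp [pvPairs, pvTls, hti, PySem.Set.update, List.append_assoc]

-- membership in a fold that conditionally adds windows to a set
lemma mem_foldl_addif {α : Type} (w : α → String) (c : String → Bool) :
    ∀ (L : List α) (ms : PySem.Set String) (x : String),
    x ∈ L.foldl (fun ms a => if c (w a) then PySem.Set.add ms (w a) else ms) ms
    ↔ x ∈ ms ∨ ∃ a ∈ L, w a = x ∧ c x = true := by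
  intro L
  induction L with
  | nil => intro ms x; simp
  | cons a L ih =>
      intro ms x
      rw [List.foldl_cons]
      by_cases hc : c (w a) = true
      · rw [if_pos hc, ih]
        simp only [PySem.Set.mem_add, List.mem_cons]
        constructor
        · rintro ((h | rfl) | ⟨b, hb, rfl, hcb⟩)
          · exact Or.inl h
          · exact Or.inr ⟨a, Or.inl rfl, rfl, hc⟩
          · exact Or.inr ⟨b, Or.inr hb, rfl, hcb⟩
        · rintro (h | ⟨b, (rfl | hb), rfl, hcb⟩)
          · exact Or.inl (Or.inl h)
          · exact Or.inl (Or.inr rfl)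
          · exact Or.inr ⟨b, hb, rfl, hcb⟩
      · rw [if_neg hc, ih]
        constructor
        · rintro (h | ⟨b, hb, rfl, hcb⟩)
          · exact Or.inl h
          · exact Or.inr ⟨b, List.mem_cons_of_mem a hb, rfl, hcb⟩
        · rintro (h | ⟨b, hb, rfl, hcb⟩)
          · exact Or.inl h
          · rcases List.mem_cons.mp hb with rfl | hb'
            · exact absurd hcb hc
            · exact Or.inr ⟨b, hb', rfl, hcb⟩

-- membership in B's nested matched-set fold
lemma mem_matched {α : Type} (w : α → Int → String) (c : String → Bool) (hi : α → Int) :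
    ∀ (L : List α) (ms : PySem.Set String) (x : String),
    x ∈ L.foldl (fun ms m =>
      (PySem.List.pyRange 0 (hi m) 1).foldl
        (fun ms i => if c (w m i) then PySem.Set.add ms (w m i) else ms) ms) ms
    ↔ x ∈ ms ∨ ∃ m ∈ L, ∃ i ∈ PySem.List.pyRange 0 (hi m) 1, w m i = x ∧ c x = true := by
  intro L
  induction L with
  | nil => intro ms x; simp
  | cons m L ih =>
      intro ms x
      rw [List.foldl_cons, ih, mem_foldl_addif (w m) c (PySem.List.pyRange 0 (hi m) 1) ms x]
      constructor
      · rintro ((h | ⟨i, hi', rfl, hcx⟩) | ⟨m', hm', i, hi', rfl, hcx⟩)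
        · exact Or.inl h
        · exact Or.inr ⟨m, List.mem_cons_self .., i, hi', rfl, hcx⟩
        · exact Or.inr ⟨m', List.mem_cons_of_mem m hm', i, hi', rfl, hcx⟩
      · rintro (h | ⟨m', hm', i, hi', rfl, hcx⟩)
        · exact Or.inl (Or.inl h)
        · rcases List.mem_cons.mp hm' with rfl | hm''
          · exact Or.inl (Or.inr ⟨i, hi', rfl, hcx⟩)
          · exact Or.inr ⟨m', hm'', i, hi', rfl, hcx⟩

-- a title occurs as some window of its own length iff it is a substring
lemma window_iff (q tl : String) (lens : List Int) (htl : tl.toList ≠ [])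
    (hmem : PySem.Str.len tl ∈ lens) (hpos : ∀ m ∈ lens, 0 ≤ m) :
    (∃ m ∈ lens, ∃ i ∈ PySem.List.pyRange 0 (PySem.Str.len q - m + 1) 1,
        PySem.Str.slice q (some i) (some (i + m)) = tl)
    ↔ PySem.Str.isIn tl q = true := by
  constructor
  · rintro ⟨m, hm, i, hi, hslice⟩
    obtain ⟨hi0, _⟩ := PySem.List.mem_pyRange_one.mp hi
    have hm0 : 0 ≤ m := hpos m hm
    have htls := congrArg String.toList hslice
    rw [PySem.Str.toList_slice, PySem.Chars.slice_eq_listSlice,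
      show i = ((i.toNat : Nat) : Int) from (Int.toNat_of_nonneg hi0).symm,
      show m = ((m.toNat : Nat) : Int) from (Int.toNat_of_nonneg hm0).symm,
      PySem.List.slice_natCast_add] at htls
    rw [PySem.Str.isIn_iff_infix]
    refine ⟨q.toList.take i.toNat, (q.toList.drop i.toNat).drop m.toNat, ?_⟩
    rw [← htls, List.append_assoc, List.take_append_drop, List.take_append_drop]
  · intro hin
    have hinC : PySem.Chars.isIn tl.toList q.toList = true := by simpa using hin
    obtain ⟨j, hpre⟩ := (PySem.Chars.exists_prefix_drop_iff_isIn tl.toList q.toList).mpr hinC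
    have hjlt : j < q.toList.length := by
      by_contra hge
      rw [List.drop_eq_nil_of_le (by omega)] at hpre
      exact htl (List.prefix_nil.mp hpre)
    have hLle : tl.toList.length + j ≤ q.toList.length := by
      have h1 := hpre.length_le
      rw [List.length_drop] at h1
      omega
    refine ⟨PySem.Str.len tl, hmem, (j : Int), ?_, ?_⟩
    · rw [PySem.List.mem_pyRange_one, PySem.Str.len_eq, PySem.Str.len_eq]
      constructor
      · exact Int.natCast_nonneg j
      · omega
    · apply String.toList_inj.mp
      rw [PySem.Str.toList_slice, PySem.Chars.slice_eq_listSlice, PySem.Str.len_eq,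
        PySem.List.slice_natCast_add]
      exact (List.prefix_iff_eq_take.mp hpre).symm

-- every string in pvTls is non-empty
lemma tls_ne_nil (dd : List (String × List (String × String))) :
    ∀ t ∈ pvTls dd, t.toList ≠ [] := by
  intro t ht
  obtain ⟨d, -, hd⟩ := List.mem_filterMap.mp ht
  unfold pvTitle? at hd
  rcases hg : (PySem.Dict.mk d.2).get? "title" with _ | t0 <;> rw [hg] at hd
  · simp at hd
  · by_cases h0 : (t0 == "") = true
    · simp [h0] at hd
    · simp only [h0, Bool.false_eq_true, if_false] at hd
      injection hd with hd
      subst hd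
      have ht0 : t0.toList ≠ [] := by
        rw [ne_eq, String.toList_eq_nil_iff]
        intro h1
        exact h0 (by rw [h1]; rfl)
      rw [PySem.Str.toList_lower]
      have hmap : PySem.Chars.lower t0.toList = t0.toList.map PySem.Chars.lowerChar := rfl
      rw [hmap]
      simpa using ht0

-- filtering B's pairs by matched-set membership gives A's matches, pointwise
lemma matches_eq (dd : List (String × List (String × String))) (ql : String)
    (matched : PySem.Set String)
    (h : ∀ t ∈ pvTls dd, (t ∈ matched ↔ PySem.Str.isIn t ql = true)) :
    ((pvPairs dd).filter (fun p => PySem.Set.contains matched p.2)).map (fun p => p.1)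
      = pvMatches dd ql := by
  induction dd with
  | nil => simp [pvPairs, pvMatches]
  | cons d dd ih =>
      rcases hgt : pvTitle? d with _ | t
      · have htls : pvTls (d :: dd) = pvTls dd := by simp [pvTls, hgt]
        have hp : pvPairs (d :: dd) = pvPairs dd := by simp [pvPairs, hgt]
        have hm : pvMatches (d :: dd) ql = pvMatches dd ql := by
          simp [pvMatches, pvCond, hgt]
        rw [hp, hm]
        exact ih (fun t ht => h t (htls ▸ ht))
      · have htmem : t ∈ pvTls (d :: dd) := by simp [pvTls, hgt]
        have htls : pvTls (d :: dd) = t :: pvTls dd := by simp [pvTls, hgt]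
        have hp : pvPairs (d :: dd) = (d.1, t) :: pvPairs dd := by simp [pvPairs, hgt]
        have hcond : pvCond d ql = PySem.Str.isIn t ql := by simp [pvCond, hgt]
        have hcm : PySem.Set.contains matched t = PySem.Str.isIn t ql := by
          rw [Bool.eq_iff_iff]
          have hco : PySem.Set.contains matched t = true ↔ t ∈ matched := by
            simp [PySem.Set.contains]
          rw [hco]
          exact h t htmem
        have hm : pvMatches (d :: dd) ql
            = (if PySem.Str.isIn t ql = true then [d.1] else []) ++ pvMatches dd ql := by
          unfold pvMatches
          rw [List.filter_cons, hcond]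
          by_cases hq : PySem.Str.isIn t ql = true
          · rw [if_pos hq, if_pos hq]; simp
          · rw [if_neg hq, if_neg hq]; simp
        have ih' := ih (fun t' ht' => h t' (htls ▸ List.mem_cons_of_mem t ht'))
        rw [hp, hm]
        simp only [List.filter_cons, hcm]
        by_cases hq : PySem.Str.isIn t ql = true
        · rw [if_pos hq, if_pos hq, List.map_cons, ih']
          rfl
        · rw [if_neg hq, if_neg hq, ih']
          rfl

-- the common assembly: A's query loop with pvMatches in place of both inner computations
def pvAssemble (query_dict : List (String × String)) (data_dict : List (String × List (String × String))) : (List (String × List String)) × List String :=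
  let r := query_dict.foldl
    (fun (st : PySem.Dict String (List String) × List String) q =>
      if pvMatches data_dict (PySem.Str.lower q.2) ≠ [] then
        (st.1.insert q.1 (pvMatches data_dict (PySem.Str.lower q.2)), st.2)
      else (st.1, st.2 ++ [q.1]))
    (PySem.Dict.empty, ([] : List String))
  (r.1.items, r.2)

lemma A_eq (qd : List (String × String)) (dd : List (String × List (String × String))) :
    rank_by_title qd dd = pvAssemble qd dd := by
  unfold rank_by_title pvAssemble
  have h : (fun (st : PySem.Dict String (List String) × List String) (q : String × String) =>
      let query_text_lower := PySem.Str.lower q.2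
      let matches_ := dd.foldl
        (fun (acc : List String) d =>
          match (PySem.Dict.mk d.2).get? "title" with
          | some t => if (!(t == "")) && PySem.Str.isIn (PySem.Str.lower t) query_text_lower then acc ++ [d.1] else acc
          | none => acc) []
      if matches_ ≠ [] then (st.1.insert q.1 matches_, st.2) else (st.1, st.2 ++ [q.1]))
      = (fun (st : PySem.Dict String (List String) × List String) (q : String × String) =>
      if pvMatches dd (PySem.Str.lower q.2) ≠ [] then
        (st.1.insert q.1 (pvMatches dd (PySem.Str.lower q.2)), st.2)
      else (st.1, st.2 ++ [q.1])) := by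
    funext st q
    simp only [fold_matches dd (PySem.Str.lower q.2) [], List.nil_append]
  rw [h]

lemma B_eq (qd : List (String × String)) (dd : List (String × List (String × String))) :
    rank_by_title_alt qd dd = pvAssemble qd dd := by
  unfold rank_by_title_alt pvAssemble
  simp only [idx_fold dd, List.nil_append]
  have hT : PySem.Set.update PySem.Set.empty (pvTls dd) = PySem.Set.ofList (pvTls dd) := by
    rw [PySem.Set.ofList_eq_foldl]; rfl
  rw [hT]
  have hFG : (fun (st : PySem.Dict String (List String) × List String) (qp : String × String) =>
      let q := PySem.Str.lower qp.2
      let n := PySem.Str.len q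
      let matched := (PySem.Set.ofList ((PySem.Set.ofList (pvTls dd)).map (fun t => PySem.Str.len t))).foldl
        (fun (ms : PySem.Set String) m =>
          (PySem.List.pyRange 0 (n - m + 1) 1).foldl
            (fun (ms : PySem.Set String) i =>
              if PySem.Set.contains (PySem.Set.ofList (pvTls dd)) (PySem.Str.slice q (some i) (some (i + m))) then
                PySem.Set.add ms (PySem.Str.slice q (some i) (some (i + m)))
              else ms)
            ms)
        PySem.Set.empty
      let matches_ := ((pvPairs dd).filter (fun p => PySem.Set.contains matched p.2)).map (fun p => p.1)
      if matches_ ≠ [] then (st.1.insert qp.1 matches_, st.2) else (st.1, st.2 ++ [qp.1]))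
      = (fun (st : PySem.Dict String (List String) × List String) (qp : String × String) =>
      if pvMatches dd (PySem.Str.lower qp.2) ≠ [] then
        (st.1.insert qp.1 (pvMatches dd (PySem.Str.lower qp.2)), st.2)
      else (st.1, st.2 ++ [qp.1])) := by
    funext st qp
    have hM : ∀ t ∈ pvTls dd,
        (t ∈ (PySem.Set.ofList ((PySem.Set.ofList (pvTls dd)).map (fun t => PySem.Str.len t))).foldl
            (fun (ms : PySem.Set String) m =>
              (PySem.List.pyRange 0 (PySem.Str.len (PySem.Str.lower qp.2) - m + 1) 1).foldl
                (fun (ms : PySem.Set String) i =>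
                  if PySem.Set.contains (PySem.Set.ofList (pvTls dd)) (PySem.Str.slice (PySem.Str.lower qp.2) (some i) (some (i + m))) then
                    PySem.Set.add ms (PySem.Str.slice (PySem.Str.lower qp.2) (some i) (some (i + m)))
                  else ms)
                ms)
            PySem.Set.empty
          ↔ PySem.Str.isIn t (PySem.Str.lower qp.2) = true) := by
      intro t ht
      have hmm := mem_matched
        (fun m i => PySem.Str.slice (PySem.Str.lower qp.2) (some i) (some (i + m)))
        (fun s => PySem.Set.contains (PySem.Set.ofList (pvTls dd)) s)
        (fun m => PySem.Str.len (PySem.Str.lower qp.2) - m + 1)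
        (PySem.Set.ofList ((PySem.Set.ofList (pvTls dd)).map (fun t => PySem.Str.len t)))
        PySem.Set.empty t
      beta_reduce at hmm
      rw [hmm]
      have hc : PySem.Set.contains (PySem.Set.ofList (pvTls dd)) t = true := by
        have hmem' : t ∈ PySem.Set.ofList (pvTls dd) := (PySem.Set.mem_ofList _ _).mpr ht
        simpa [PySem.Set.contains] using hmem'
      have hmem : PySem.Str.len t ∈ PySem.Set.ofList ((PySem.Set.ofList (pvTls dd)).map (fun t => PySem.Str.len t)) :=
        (PySem.Set.mem_ofList _ _).mpr (List.mem_map.mpr ⟨t, (PySem.Set.mem_ofList _ _).mpr ht, rfl⟩)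
      have hpos : ∀ m ∈ PySem.Set.ofList ((PySem.Set.ofList (pvTls dd)).map (fun t => PySem.Str.len t)), 0 ≤ m := by
        intro m hm
        obtain ⟨t', -, rfl⟩ := List.mem_map.mp ((PySem.Set.mem_ofList _ _).mp hm)
        rw [PySem.Str.len_eq]
        exact Int.natCast_nonneg _
      have hw := window_iff (PySem.Str.lower qp.2) t
        (PySem.Set.ofList ((PySem.Set.ofList (pvTls dd)).map (fun t => PySem.Str.len t)))
        (tls_ne_nil dd t ht) hmem hpos
      constructor
      · rintro (hfalse | ⟨m, hm, i, hi', hslice, -⟩)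
        · simp [PySem.Set.empty] at hfalse
        · exact hw.mp ⟨m, hm, i, hi', hslice⟩
      · intro hin
        obtain ⟨m, hm, i, hi', hslice⟩ := hw.mpr hin
        exact Or.inr ⟨m, hm, i, hi', hslice, hc⟩
    simp only []
    rw [matches_eq dd (PySem.Str.lower qp.2) _ hM]
  rw [hFG]

-- ===== VERDICT (by name: the statement is the Claim_ definition above) =====
theorem rank_by_title_spec : Claim_equal_rank_by_title := by
  intro qd dd _
  unfold Spec_rank_by_title
  rw [A_eq, B_eq]
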